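-- pv_equiv track=rewrite | github.com/Requinschats/472_project_2 | Heuristic/selectors.py | select_surrounding_moves_from_position_score
-- ===== SOURCE A (Python) =====
-- def select_is_move_on_board(board_size, move):
--     x, y = move
--     if -1 < y < board_size and -1 < x < board_size: return True
--     return False
--
-- def select_surrounding_moves(x, y):
--     return [(x - 1, y - 1), (x, y - 1), (x + 1, y - 1), (x - 1, y), (x + 1, y),
--             (x - 1, y + 1), (x, y + 1), (x + 1, y + 1)]
--
-- def select_surrounding_moves_from_position_score(board, position_coordinates, board_size):
--     connection_count = 0
--     (x, y) = position_coordinates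
--     for move in select_surrounding_moves(x, y):
--         x_surrounding, y_surrounding = move
--         if not select_is_move_on_board(board_size, move): continue
--         if board[y_surrounding][x_surrounding] == board[y][x]:
--             connection_count += 1
--     return connection_count
-- ===== SOURCE B (Python) =====
-- def select_surrounding_moves_from_position_score(board, position_coordinates, board_size):
--     x, y = position_coordinates
--     rows = range(max(0, y - 1), min(board_size, y + 2))
--     lo, hi = max(0, x - 1), min(board_size, x + 2)
--     if not rows or hi <= lo:
--         return 0
--     v = board[y][x]
--     total = sum(board[yy][lo:hi].count(v) for yy in rows)
--     # the centre cell itself is inside the counted window iff it is on the board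
--     return total - (0 <= x < board_size and 0 <= y < board_size)
-- ===== Notes on version B (the rewrite author's own statement) =====
-- stated objective: alternative
-- what changed: Replaces the enumerate-8-candidates-and-bound-check loop by per-row bulk counting: slice the clamped column window out of each window row, count the centre value in the slice with list.count, sum the row counts and subtract the centre cell's own contribution (inclusion-exclusion).
-- outside the precondition, e.g. on select_surrounding_moves_from_position_score([], (0, 0), 1): A returns 0, B raises IndexError
import Mathlib
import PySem

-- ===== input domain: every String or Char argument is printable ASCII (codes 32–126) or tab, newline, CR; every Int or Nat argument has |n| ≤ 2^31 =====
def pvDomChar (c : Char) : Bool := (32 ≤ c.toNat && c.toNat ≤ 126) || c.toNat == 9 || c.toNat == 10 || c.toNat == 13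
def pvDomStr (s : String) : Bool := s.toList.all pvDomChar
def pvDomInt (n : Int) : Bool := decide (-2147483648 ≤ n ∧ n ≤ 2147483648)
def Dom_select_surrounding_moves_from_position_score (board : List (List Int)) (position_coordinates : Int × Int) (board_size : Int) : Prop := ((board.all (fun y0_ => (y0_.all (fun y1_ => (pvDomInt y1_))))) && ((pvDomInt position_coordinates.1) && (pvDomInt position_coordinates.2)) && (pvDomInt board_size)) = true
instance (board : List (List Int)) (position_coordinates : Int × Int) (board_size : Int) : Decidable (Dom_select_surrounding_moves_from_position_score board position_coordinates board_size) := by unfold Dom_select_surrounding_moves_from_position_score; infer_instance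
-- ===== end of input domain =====

-- B replaces A's enumerate-8-candidates-and-bound-check loop by per-row bulk counting:
-- it slices the clamped column window out of each window row, counts the centre value in
-- the slice with list.count, sums the three row counts, and subtracts the centre cell's
-- own contribution (inclusion–exclusion) — a simpler decomposition, same cost.

-- ===== PORT A =====
-- board[i][j] under Python indexing (negative wraps); default 0/[] is only reached
-- outside Pre_, where the Python raises IndexError.
def pvCell (board : List (List Int)) (i j : Int) : Int :=
  PySem.List.pyGetD (PySem.List.pyGetD board i []) j 0

def select_is_move_on_board (board_size : Int) (move : Int × Int) : Bool :=
  if -1 < move.2 ∧ move.2 < board_size ∧ -1 < move.1 ∧ move.1 < board_size then true else false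

def select_surrounding_moves (x y : Int) : List (Int × Int) :=
  [(x - 1, y - 1), (x, y - 1), (x + 1, y - 1), (x - 1, y), (x + 1, y),
   (x - 1, y + 1), (x, y + 1), (x + 1, y + 1)]

def select_surrounding_moves_from_position_score (board : List (List Int)) (position_coordinates : Int × Int) (board_size : Int) : Int :=
  let x := position_coordinates.1
  let y := position_coordinates.2
  List.foldl (fun connection_count move =>
      if select_is_move_on_board board_size move = false then connection_count
      else if pvCell board move.2 move.1 = pvCell board y x then connection_count + 1
      else connection_count)
    0 (select_surrounding_moves x y)

-- ===== PORT B =====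
def select_surrounding_moves_from_position_score_alt (board : List (List Int)) (position_coordinates : Int × Int) (board_size : Int) : Int :=
  let x := position_coordinates.1
  let y := position_coordinates.2
  let rows := PySem.List.pyRange (max 0 (y - 1)) (min board_size (y + 2)) 1
  let lo := max 0 (x - 1)
  let hi := min board_size (x + 2)
  if rows = [] ∨ hi ≤ lo then 0
  else
    let v := pvCell board y x
    let total := List.foldl (fun s yy =>
        s + ((PySem.List.count (PySem.List.slice (PySem.List.pyGetD board yy []) (some lo) (some hi)) v : Nat) : Int))
      0 rows
    total - (if (0 ≤ x ∧ x < board_size) ∧ (0 ≤ y ∧ y < board_size) then 1 else 0)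

-- ===== PRECONDITION & SPEC =====
-- Python cell access board[i][j] succeeds (Python indexing: negative wraps from the end).
def pvCellOk (board : List (List Int)) (i j : Int) : Bool :=
  match PySem.List.pyGet? board i with
  | some row => (PySem.List.pyGet? row j).isSome
  | none => false

-- Pre_ requires every cell of the clamped 3×3 window, and (if the window is nonempty) the
-- centre cell, to be accessible.  This excludes exactly the inputs where the Python A raises
-- IndexError, plus one corner on which A still returns (see cites): board_size = 1 with
-- position (0,0) on a board missing cell (0,0) — there A's window contains only the centre,
-- so A returns 0 without ever touching the board, while B's natural read of the centre value
-- raises IndexError.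
def Pre_select_surrounding_moves_from_position_score (board : List (List Int)) (position_coordinates : Int × Int) (board_size : Int) : Prop :=
  ∀ yy ∈ ([position_coordinates.2 - 1, position_coordinates.2, position_coordinates.2 + 1] : List Int),
    ∀ xx ∈ ([position_coordinates.1 - 1, position_coordinates.1, position_coordinates.1 + 1] : List Int),
      (0 ≤ yy ∧ yy < board_size ∧ 0 ≤ xx ∧ xx < board_size) →
        pvCellOk board yy xx = true ∧
        pvCellOk board position_coordinates.2 position_coordinates.1 = true

instance (board : List (List Int)) (position_coordinates : Int × Int) (board_size : Int) : Decidable (Pre_select_surrounding_moves_from_position_score board position_coordinates board_size) := by unfold Pre_select_surrounding_moves_from_position_score; infer_instance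

def pvWitness_select_surrounding_moves_from_position_score : List (List Int) × (Int × Int) × Int :=
  ([[1, 1], [1, 2]], (0, 0), 2)

def Spec_select_surrounding_moves_from_position_score (board : List (List Int)) (position_coordinates : Int × Int) (board_size : Int) (out : Int) : Prop := out = select_surrounding_moves_from_position_score_alt board position_coordinates board_size
instance (board : List (List Int)) (position_coordinates : Int × Int) (board_size : Int) (out : Int) : Decidable (Spec_select_surrounding_moves_from_position_score board position_coordinates board_size out) := by unfold Spec_select_surrounding_moves_from_position_score; infer_instance

-- ===== CLAIM (what is proved, stated in full; the proofs are below) =====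
def Claim_equal_select_surrounding_moves_from_position_score : Prop := ∀ (board : List (List Int)) (position_coordinates : Int × Int) (board_size : Int), Dom_select_surrounding_moves_from_position_score board position_coordinates board_size → Pre_select_surrounding_moves_from_position_score board position_coordinates board_size → Spec_select_surrounding_moves_from_position_score board position_coordinates board_size (select_surrounding_moves_from_position_score board position_coordinates board_size)

-- ===== LEMMAS AND PROOFS =====

-- the common 0/1 window term both sides are reduced to
def pvT (board : List (List Int)) (x y bs yy xx : Int) : Int :=
  if (0 ≤ yy ∧ yy < bs) ∧ (0 ≤ xx ∧ xx < bs) ∧ pvCell board yy xx = pvCell board y x then 1 else 0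

-- the clamped window range is the bound-filtered candidate triple
lemma pv_win_eq (y bs : Int) :
    PySem.List.pyRange (max 0 (y - 1)) (min bs (y + 2)) 1
      = [y - 1, y, y + 1].filter (fun v => decide (0 ≤ v ∧ v < bs)) := by
  have h1 : (PySem.List.pyRange (max 0 (y - 1)) (min bs (y + 2)) 1).Nodup :=
    PySem.List.nodup_pyRange_one _ _
  have h2 : ([y - 1, y, y + 1].filter (fun v => decide (0 ≤ v ∧ v < bs))).Nodup := by
    apply List.Nodup.filter
    simp [List.nodup_cons]
    omega
  have hs1 : (PySem.List.pyRange (max 0 (y - 1)) (min bs (y + 2)) 1).Pairwise (· < ·) :=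
    PySem.List.pairwise_lt_pyRange_one _ _
  have hs2 : ([y - 1, y, y + 1].filter (fun v => decide (0 ≤ v ∧ v < bs))).Pairwise (· < ·) := by
    apply List.Pairwise.filter
    simp [List.pairwise_cons]
  have hmem : ∀ a : Int, a ∈ PySem.List.pyRange (max 0 (y - 1)) (min bs (y + 2)) 1 ↔
      a ∈ [y - 1, y, y + 1].filter (fun v => decide (0 ≤ v ∧ v < bs)) := by
    intro a
    simp [PySem.List.mem_pyRange_one, List.mem_filter]
    omega
  exact ((List.perm_ext_iff_of_nodup h1 h2).2 hmem).eq_of_pairwise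
    (fun a b _ _ hab hba => by omega) hs1 hs2

lemma pv_sum_map_filter (p : Int → Bool) (g : Int → Int) : ∀ (l : List Int),
    ((l.filter p).map g).sum = (l.map (fun v => if p v then g v else 0)).sum := by
  intro l
  induction l with
  | nil => rfl
  | cons h t ih => by_cases hp : p h <;> simp [hp, ih]

-- A's value, expressed through pvT (all inputs)
lemma pv_A_eq (board : List (List Int)) (x y bs : Int) :
    select_surrounding_moves_from_position_score board (x, y) bs
      = (([y - 1, y, y + 1].map (fun yy =>
            ([x - 1, x, x + 1].map (fun xx => pvT board x y bs yy xx)).sum)).sum)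
        - pvT board x y bs y x := by
  unfold select_surrounding_moves_from_position_score
  have stepA : (fun (cc : Int) (m : Int × Int) =>
      if select_is_move_on_board bs m = false then cc
      else if pvCell board m.2 m.1 = pvCell board y x then cc + 1 else cc)
      = fun cc m => cc + (if (-1 < m.2 ∧ m.2 < bs ∧ -1 < m.1 ∧ m.1 < bs) ∧
          pvCell board m.2 m.1 = pvCell board y x then 1 else 0) := by
    funext cc m
    simp only [select_is_move_on_board]
    split_ifs <;> simp_all
  have hterm : ∀ yy xx : Int, (if (-1 < yy ∧ yy < bs ∧ -1 < xx ∧ xx < bs) ∧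
      pvCell board yy xx = pvCell board y x then (1 : Int) else 0) = pvT board x y bs yy xx := by
    intro yy xx
    have hiff : ((-1 < yy ∧ yy < bs ∧ -1 < xx ∧ xx < bs) ∧
        pvCell board yy xx = pvCell board y x) ↔
        ((0 ≤ yy ∧ yy < bs) ∧ (0 ≤ xx ∧ xx < bs) ∧ pvCell board yy xx = pvCell board y x) := by
      constructor
      · rintro ⟨⟨a, b, c, d⟩, e⟩; exact ⟨⟨by omega, b⟩, ⟨by omega, d⟩, e⟩
      · rintro ⟨⟨a, b⟩, ⟨c, d⟩, e⟩; exact ⟨⟨by omega, b, by omega, d⟩, e⟩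
    unfold pvT
    simp only [hiff]
  simp only [stepA, PySem.List.foldl_add, select_surrounding_moves, List.map_cons,
    List.map_nil, List.sum_cons, List.sum_nil, hterm]
  ring

-- reading a window row through pyRange equals the Python slice
lemma pv_map_pyGetD_eq_slice (row : List Int) (lo hi : Int)
    (h0 : 0 ≤ lo) (h1 : lo ≤ hi) (h2 : hi ≤ (row.length : Int)) :
    (PySem.List.pyRange lo hi 1).map (fun xx => PySem.List.pyGetD row xx 0)
      = PySem.List.slice row (some lo) (some hi) := by
  have aux : ∀ (n a : Nat), a + n ≤ row.length →
      (PySem.List.pyRange (a : Int) ((a : Int) + (n : Int)) 1).map (fun xx => PySem.List.pyGetD row xx 0)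
        = (row.drop a).take n := by
    intro n
    induction n with
    | zero =>
      intro a _
      have hnil : PySem.List.pyRange (a : Int) ((a : Int) + ((0 : Nat) : Int)) 1 = [] := by
        refine List.eq_nil_iff_forall_not_mem.2 (fun z hz => ?_)
        have := PySem.List.mem_pyRange_one.1 hz
        omega
      simp only [hnil, List.map_nil, List.take_zero]
    | succ n ih =>
      intro a h
      have hlt : (a : Int) < (a : Int) + (((n : Nat) + 1 : Nat) : Int) := by push_cast; omega
      rw [PySem.List.pyRange_one_cons hlt]
      have ha : a < row.length := by omega
      have hget : PySem.List.pyGetD row (a : Int) 0 = row[a] := by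
        rw [PySem.List.pyGetD_eq_getElem row 0 (by omega) (by exact_mod_cast ha)]
        simp
      have hstep : ((a : Int) + 1) = ((a + 1 : Nat) : Int) := by push_cast; ring
      have hend : (a : Int) + (((n : Nat) + 1 : Nat) : Int) = ((a + 1 : Nat) : Int) + ((n : Nat) : Int) := by
        push_cast; ring
      have hdrop : row.drop a = row[a] :: row.drop (a + 1) := List.drop_eq_getElem_cons ha
      rw [List.map_cons, hget, hstep, hend, ih (a + 1) (by omega), hdrop, List.take_succ_cons]
  have e1 : lo = ((lo.toNat : Nat) : Int) := by omega
  have e2 : hi = ((lo.toNat : Nat) : Int) + (((hi - lo).toNat : Nat) : Int) := by omega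
  rw [PySem.List.slice_of_nonneg row h0 (le_trans h0 h1) (by omega) h2, e1, e2,
    aux (hi - lo).toNat lo.toNat (by omega)]
  congr 1
  omega

-- B's value, expressed through pvT (under Pre_)
lemma pv_B_eq (board : List (List Int)) (x y bs : Int)
    (hpre : Pre_select_surrounding_moves_from_position_score board (x, y) bs) :
    select_surrounding_moves_from_position_score_alt board (x, y) bs
      = (([y - 1, y, y + 1].map (fun yy =>
            ([x - 1, x, x + 1].map (fun xx => pvT board x y bs yy xx)).sum)).sum)
        - pvT board x y bs y x := by
  simp only [select_surrounding_moves_from_position_score_alt]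
  by_cases hg : (PySem.List.pyRange (max 0 (y - 1)) (min bs (y + 2)) 1 = [] ∨
      min bs (x + 2) ≤ max 0 (x - 1))
  · rw [if_pos hg]
    have hz : ∀ yy xx : Int, y - 1 ≤ yy → yy ≤ y + 1 → x - 1 ≤ xx → xx ≤ x + 1 →
        pvT board x y bs yy xx = 0 := by
      intro yy xx h1 h2 h3 h4
      unfold pvT
      rcases hg with hr | hc
      · have hfact : ¬ (max 0 (y - 1) < min bs (y + 2)) := by
          intro hlt
          have := PySem.List.mem_pyRange_one.2 ⟨le_refl (max 0 (y - 1)), hlt⟩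
          rw [hr] at this
          exact absurd this (List.not_mem_nil)
        rw [if_neg]
        rintro ⟨⟨a, b⟩, _⟩
        omega
      · rw [if_neg]
        rintro ⟨_, ⟨a, b⟩, _⟩
        omega
    have z1 := hz (y - 1) (x - 1) (by omega) (by omega) (by omega) (by omega)
    have z2 := hz (y - 1) x (by omega) (by omega) (by omega) (by omega)
    have z3 := hz (y - 1) (x + 1) (by omega) (by omega) (by omega) (by omega)
    have z4 := hz y (x - 1) (by omega) (by omega) (by omega) (by omega)
    have z5 := hz y x (by omega) (by omega) (by omega) (by omega)
    have z6 := hz y (x + 1) (by omega) (by omega) (by omega) (by omega)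
    have z7 := hz (y + 1) (x - 1) (by omega) (by omega) (by omega) (by omega)
    have z8 := hz (y + 1) x (by omega) (by omega) (by omega) (by omega)
    have z9 := hz (y + 1) (x + 1) (by omega) (by omega) (by omega) (by omega)
    simp [z1, z2, z3, z4, z5, z6, z7, z8, z9]
  · rw [if_neg hg]
    rw [not_or] at hg
    obtain ⟨hrows, hc⟩ := hg
    -- the centre correction is the centre's pvT term
    have hcenter : (if (0 ≤ x ∧ x < bs) ∧ (0 ≤ y ∧ y < bs) then (1 : Int) else 0)
        = pvT board x y bs y x := by
      unfold pvT
      split_ifs with h1 h2 <;> first | rfl | simp_all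
    -- per-row: the slice count is the row of pvT terms
    have hrow : ∀ yy ∈ PySem.List.pyRange (max 0 (y - 1)) (min bs (y + 2)) 1,
        ((PySem.List.count (PySem.List.slice (PySem.List.pyGetD board yy [])
            (some (max 0 (x - 1))) (some (min bs (x + 2)))) (pvCell board y x) : Nat) : Int)
          = ([x - 1, x, x + 1].map (fun xx => pvT board x y bs yy xx)).sum := by
      intro yy hyy
      rw [pv_win_eq] at hyy
      obtain ⟨hyy3, hyyb⟩ := List.mem_filter.1 hyy
      have hyyb' : 0 ≤ yy ∧ yy < bs := by simpa using hyyb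
      -- the window's last column is one of the three candidates, and Pre_ makes it accessible
      have hlast3 : min bs (x + 2) - 1 ∈ ([x - 1, x, x + 1] : List Int) := by
        simp only [List.mem_cons, List.not_mem_nil, or_false]
        omega
      have hok := (hpre yy hyy3 (min bs (x + 2) - 1) hlast3
        ⟨hyyb'.1, hyyb'.2, by omega, by omega⟩).1
      -- turn accessibility into a length bound for the row B slices
      have hylt : yy.toNat < board.length := by
        unfold pvCellOk at hok
        by_contra hlen
        have : PySem.List.pyGet? board yy = none := by
          rw [show yy = ((yy.toNat : Nat) : Int) by omega, PySem.List.pyGet?_natCast]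
          exact List.getElem?_eq_none (by omega)
        rw [this] at hok
        exact absurd hok (by simp)
      have hrowdef : PySem.List.pyGetD board yy [] = board[yy.toNat] := by
        rw [PySem.List.pyGetD_eq_getElem board [] hyyb'.1 (by omega)]
      have hlen : min bs (x + 2) ≤ (board[yy.toNat].length : Int) := by
        unfold pvCellOk at hok
        rw [show yy = ((yy.toNat : Nat) : Int) by omega, PySem.List.pyGet?_natCast,
          List.getElem?_eq_getElem hylt] at hok
        simp only [Option.isSome_iff_exists] at hok
        obtain ⟨w, hw⟩ := hok
        have hne : PySem.List.pyGet? board[yy.toNat] (min bs (x + 2) - 1) ≠ none := by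
          intro hn; rw [hn] at hw; cases hw
        rw [show min bs (x + 2) - 1 = (((min bs (x + 2) - 1).toNat : Nat) : Int) by omega,
          PySem.List.pyGet?_natCast] at hne
        obtain ⟨w', hw'⟩ := Option.ne_none_iff_exists'.1 hne
        have hlt' := (List.getElem?_eq_some_iff.1 hw').1
        omega
      -- slice to pyRange of reads
      rw [hrowdef, ← pv_map_pyGetD_eq_slice board[yy.toNat] (max 0 (x - 1)) (min bs (x + 2))
          (by omega) (by omega) hlen]
      -- count = 0/1-sum over the slice
      rw [PySem.List.count_eq]
      have hcount : ∀ l : List Int, ((List.count (pvCell board y x) l : Nat) : Int)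
          = (l.map (fun c => if c = pvCell board y x then (1 : Int) else 0)).sum := by
        intro l
        rw [show (fun c => if c = pvCell board y x then (1 : Int) else 0)
            = (fun c => if (c == pvCell board y x) = true then (1 : Int) else 0) by
          funext c; simp]
        rw [PySem.List.sum_map_ite_one_zero]
        simp [List.count]
      rw [hcount, List.map_map]
      -- reads through the range are pvT terms over the filtered candidates
      rw [pv_win_eq x bs, pv_sum_map_filter]
      have hT : ∀ xx : Int, (if 0 ≤ xx ∧ xx < bs then
          (if PySem.List.pyGetD board[yy.toNat] xx 0 = pvCell board y x then (1 : Int) else 0)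
          else 0) = pvT board x y bs yy xx := by
        intro xx
        unfold pvT pvCell
        rw [hrowdef]
        split_ifs <;> simp_all
      simp only [Function.comp_def, decide_eq_true_eq]
      exact congrArg List.sum (List.map_congr_left fun xx _ => hT xx)
    rw [PySem.List.foldl_add, List.map_congr_left hrow, pv_win_eq y bs, pv_sum_map_filter]
    have habs : ∀ yy : Int, (if 0 ≤ yy ∧ yy < bs then
        ([x - 1, x, x + 1].map (fun xx => pvT board x y bs yy xx)).sum else 0)
        = ([x - 1, x, x + 1].map (fun xx => pvT board x y bs yy xx)).sum := by
      intro yy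
      split_ifs with h
      · rfl
      · have hz : ∀ xx : Int, pvT board x y bs yy xx = 0 := fun xx =>
          if_neg (fun hcond => h hcond.1)
        simp [hz]
    simp only [decide_eq_true_eq, habs]
    rw [hcenter]
    ring

-- ===== VERDICT =====
theorem select_surrounding_moves_from_position_score_spec : Claim_equal_select_surrounding_moves_from_position_score := by
  intro board pc bs _ hpre
  obtain ⟨x, y⟩ := pc
  unfold Spec_select_surrounding_moves_from_position_score
  rw [pv_A_eq, pv_B_eq board x y bs hpre]
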